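-- pv_equiv track=rewrite | github.com/tensorflow/tensor2tensor | tensor2tensor/utils/registry.py | parse_problem_name
-- ===== SOURCE A (Python) =====
-- import collections
--
-- ProblemSpec = collections.namedtuple("ProblemSpec",
--                                      ["base_name", "was_reversed", "was_copy"])
--
-- def parse_problem_name(name):
--   """Determines if problem_name specifies a copy and/or reversal.
--
--   Args:
--     name: str, problem name, possibly with suffixes.
--
--   Returns:
--     ProblemSpec: namedtuple with ["base_name", "was_reversed", "was_copy"]
--
--   Raises:
--     ValueError if name contains multiple suffixes of the same type
--       ('_rev' or '_copy'). One of each is ok.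
--   """
--   # Recursively strip tags until we reach a base name.
--   if name.endswith("_rev"):
--     base, was_reversed, was_copy = parse_problem_name(name[:-4])
--     if was_reversed:
--       # duplicate rev
--       raise ValueError(
--           "Invalid problem name %s: multiple '_rev' instances" % name)
--     return ProblemSpec(base, True, was_copy)
--   elif name.endswith("_copy"):
--     base, was_reversed, was_copy = parse_problem_name(name[:-5])
--     if was_copy:
--       raise ValueError(
--           "Invalid problem_name %s: multiple '_copy' instances" % name)
--     return ProblemSpec(base, was_reversed, True)
--   else:
--     return ProblemSpec(name, False, False)
-- ===== SOURCE B (Python) =====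
-- import collections
--
-- ProblemSpec = collections.namedtuple("ProblemSpec",
--                                      ["base_name", "was_reversed", "was_copy"])
--
-- # With at most one '_rev' and one '_copy' allowed, a valid name can only end in
-- # one of four tag combinations; look the ending up in a fixed table instead of
-- # stripping tags one by one.
-- _TAG_TABLE = (("_copy_rev", True, True),
--               ("_rev_copy", True, True),
--               ("_rev", True, False),
--               ("_copy", False, True))
--
-- def parse_problem_name(name):
--   for suffix, was_reversed, was_copy in _TAG_TABLE:
--     if name.endswith(suffix):
--       base = name[:-len(suffix)]
--       if base.endswith("_rev") or base.endswith("_copy"):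
--         # a third tag necessarily duplicates one of the two kinds
--         raise ValueError(
--             "Invalid problem name %s: duplicate suffixes" % name)
--       return ProblemSpec(base, was_reversed, was_copy)
--   return ProblemSpec(name, False, False)
-- ===== Notes on version B (the rewrite author's own statement) =====
-- stated objective: alternative
-- what changed: Replaces A's recursion (strip one tag, recurse, patch flags) by a single table lookup: since at most one '_rev' and one '_copy' are legal, only four tag endings exist, so B matches the longest table ending, strips it once, and raises if a further tag remains (B's ValueError message differs from A's, outside Pre_).
import Mathlib
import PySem

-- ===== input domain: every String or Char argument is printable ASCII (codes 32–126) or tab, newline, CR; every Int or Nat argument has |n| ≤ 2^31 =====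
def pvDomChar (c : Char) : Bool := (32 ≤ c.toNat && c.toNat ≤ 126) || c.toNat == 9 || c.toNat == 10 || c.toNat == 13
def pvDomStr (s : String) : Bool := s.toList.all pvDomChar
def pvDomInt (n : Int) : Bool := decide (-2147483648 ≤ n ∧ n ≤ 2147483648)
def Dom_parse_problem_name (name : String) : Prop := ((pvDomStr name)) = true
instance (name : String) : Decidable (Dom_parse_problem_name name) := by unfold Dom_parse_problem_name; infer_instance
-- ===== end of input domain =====

-- B replaces A's recursion by a fixed four-entry suffix table (at most one '_rev' and one
-- '_copy' are legal, so only four tag endings exist); equal return values are proved on Pre_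
-- (A raises ValueError outside it, and so does B, with a different message).


-- the two tag literals, as code-point lists
def revT : List Char := ['_', 'r', 'e', 'v']
def copyT : List Char := ['_', 'c', 'o', 'p', 'y']

-- ===== PORT A =====
-- recursive strip, patching the flags on the way back out (Python's recursion);
-- where Python raises ValueError on a duplicate tag the flag is simply set (excluded by Pre_)
def parseA_go (l : List Char) : List Char × Bool × Bool :=
  if h : PySem.Chars.endswith l revT = true then
    let p := parseA_go (PySem.Chars.slice l none (some (-4)))   -- name[:-4]
    (p.1, true, p.2.2)
  else if h2 : PySem.Chars.endswith l copyT = true then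
    let p := parseA_go (PySem.Chars.slice l none (some (-5)))   -- name[:-5]
    (p.1, p.2.1, true)
  else
    (l, false, false)
termination_by l.length
decreasing_by
  · rw [PySem.Chars.slice_eq_listSlice, PySem.List.slice_to_neg_ofNat l 4 (by omega)]
    have hle := ((PySem.Chars.endswith_iff _ _).mp h).length_le
    simp only [List.length_take, revT, List.length_cons, List.length_nil] at hle ⊢
    omega
  · rw [PySem.Chars.slice_eq_listSlice, PySem.List.slice_to_neg_ofNat l 5 (by omega)]
    have hle := ((PySem.Chars.endswith_iff _ _).mp h2).length_le
    simp only [List.length_take, copyT, List.length_cons, List.length_nil] at hle ⊢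
    omega

def parse_problem_name (name : String) : String × Bool × Bool :=
  let p := parseA_go name.toList
  (String.ofList p.1, p.2.1, p.2.2)

-- ===== PORT B =====
-- Source B's fixed table of the four possible tag endings, longest first
def tagTable : List (List Char × Bool × Bool) :=
  [(['_', 'c', 'o', 'p', 'y', '_', 'r', 'e', 'v'], true, true),
   (['_', 'r', 'e', 'v', '_', 'c', 'o', 'p', 'y'], true, true),
   (['_', 'r', 'e', 'v'], true, false),
   (['_', 'c', 'o', 'p', 'y'], false, true)]

def parse_problem_name_alt (name : String) : String × Bool × Bool :=
  let l := name.toList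
  match tagTable.find? (fun e => PySem.Chars.endswith l e.1) with
  | some (suf, r, c) =>
      -- Source B raises ValueError here when a further tag remains on the base
      -- (only outside Pre_); the port just returns the stripped value
      (String.ofList (PySem.List.slice l none (some (-(suf.length : Int)))), r, c)
  | none => (String.ofList l, false, false)

-- ===== PRECONDITION & SPEC =====
-- Pre_ excludes exactly the names whose trailing '_rev'/'_copy' tag chain contains a duplicate
-- tag, on which the Python A raises ValueError (with two tags only, a chain of three or more
-- always duplicates, so the six endings below are exactly the raising inputs).
def Pre_parse_problem_name (name : String) : Prop :=
  PySem.Str.endswith name "_rev_rev" = false ∧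
  PySem.Str.endswith name "_copy_copy" = false ∧
  PySem.Str.endswith name "_rev_copy_rev" = false ∧
  PySem.Str.endswith name "_copy_copy_rev" = false ∧
  PySem.Str.endswith name "_rev_rev_copy" = false ∧
  PySem.Str.endswith name "_copy_rev_copy" = false
instance (name : String) : Decidable (Pre_parse_problem_name name) := by
  unfold Pre_parse_problem_name; infer_instance
def pvWitness_parse_problem_name : String := "algorithmic_math_copy_rev"

def Spec_parse_problem_name (name : String) (out : String × Bool × Bool) : Prop := out = parse_problem_name_alt name
instance (name : String) (out : String × Bool × Bool) : Decidable (Spec_parse_problem_name name out) := by unfold Spec_parse_problem_name; infer_instance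

-- ===== CLAIM (what is proved, stated in full; the proofs are below) =====
def Claim_equal_parse_problem_name : Prop := ∀ (name : String), Dom_parse_problem_name name → Pre_parse_problem_name name → Spec_parse_problem_name name (parse_problem_name name)

-- ===== LEMMAS AND PROOFS =====

theorem ends_self (t s : List Char) : PySem.Chars.endswith (t ++ s) s = true :=
  (PySem.Chars.endswith_iff _ _).mpr (List.suffix_append t s)

-- suffix cancellation: (u ++ s) is a suffix of (t ++ s) iff u is a suffix of t
theorem ends_cancel (t u s : List Char) :
    PySem.Chars.endswith (t ++ s) (u ++ s) = PySem.Chars.endswith t u := by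
  by_cases h : PySem.Chars.endswith t u = true
  · obtain ⟨w, hw⟩ := (PySem.Chars.endswith_iff _ _).mp h
    rw [h, (PySem.Chars.endswith_iff _ _).mpr ⟨w, by rw [← List.append_assoc, hw]⟩]
  · rw [Bool.eq_false_iff.mpr h, Bool.eq_false_iff]
    intro hc
    obtain ⟨w, hw⟩ := (PySem.Chars.endswith_iff _ _).mp hc
    rw [← List.append_assoc] at hw
    exact h ((PySem.Chars.endswith_iff _ _).mpr ⟨w, List.append_cancel_right hw⟩)

theorem ends_of_ends_append (l a b : List Char)
    (h : PySem.Chars.endswith l (a ++ b) = true) : PySem.Chars.endswith l b = true :=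
  (PySem.Chars.endswith_iff _ _).mpr
    (((List.suffix_append a b).trans ((PySem.Chars.endswith_iff _ _).mp h)))

theorem ends_false_of_last (l s : List Char) (c d : Char)
    (hl : l.getLast? = some c) (hs : s.getLast? = some d) (hne : c ≠ d) :
    PySem.Chars.endswith l s = false := by
  rw [Bool.eq_false_iff]
  intro h
  obtain ⟨w, hw⟩ := (PySem.Chars.endswith_iff _ _).mp h
  have hne' : s ≠ [] := by intro hnil; rw [hnil] at hs; simp at hs
  rw [← hw, List.getLast?_append_of_ne_nil _ hne', hs] at hl
  exact hne (Option.some.inj hl).symm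

theorem last_rev (t : List Char) : (t ++ revT).getLast? = some 'v' := by
  rw [List.getLast?_append_of_ne_nil _ (by decide)]; decide
theorem last_copy (t : List Char) : (t ++ copyT).getLast? = some 'y' := by
  rw [List.getLast?_append_of_ne_nil _ (by decide)]; decide
theorem last_rc (t : List Char) : (t ++ (revT ++ copyT)).getLast? = some 'y' := by
  rw [← List.append_assoc]; exact last_copy _

theorem strip4 (t : List Char) :
    PySem.List.slice (t ++ revT) none (some (-4)) = t := by
  rw [PySem.List.slice_to_neg_ofNat _ 4 (by omega)]
  simp [revT]

theorem strip5 (t : List Char) :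
    PySem.List.slice (t ++ copyT) none (some (-5)) = t := by
  rw [PySem.List.slice_to_neg_ofNat _ 5 (by omega)]
  simp [copyT]

theorem strip9cr (t : List Char) :
    PySem.List.slice (t ++ (copyT ++ revT)) none (some (-9)) = t := by
  rw [PySem.List.slice_to_neg_ofNat _ 9 (by omega)]
  simp [copyT, revT]

theorem strip9rc (t : List Char) :
    PySem.List.slice (t ++ (revT ++ copyT)) none (some (-9)) = t := by
  rw [PySem.List.slice_to_neg_ofNat _ 9 (by omega)]
  simp [copyT, revT]

-- A-side step lemmas
theorem parseA_base (l : List Char) (hr : PySem.Chars.endswith l revT = false)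
    (hc : PySem.Chars.endswith l copyT = false) : parseA_go l = (l, false, false) := by
  rw [parseA_go]; simp [hr, hc]

theorem parseA_rev (t : List Char) :
    parseA_go (t ++ revT) = ((parseA_go t).1, true, (parseA_go t).2.2) := by
  rw [parseA_go]
  simp [ends_self, PySem.Chars.slice_eq_listSlice, strip4]

theorem parseA_copy (t : List Char) :
    parseA_go (t ++ copyT) = ((parseA_go t).1, (parseA_go t).2.1, true) := by
  have hf : PySem.Chars.endswith (t ++ copyT) revT = false :=
    ends_false_of_last (t ++ copyT) revT 'y' 'v' (last_copy t) (by decide) (by decide)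
  rw [parseA_go]
  simp [hf, ends_self, PySem.Chars.slice_eq_listSlice, strip5]

theorem parseA_rev2 (t s : List Char) :
    parseA_go (t ++ (s ++ revT)) = ((parseA_go (t ++ s)).1, true, (parseA_go (t ++ s)).2.2) := by
  rw [← List.append_assoc]; exact parseA_rev _

theorem parseA_copy2 (t s : List Char) :
    parseA_go (t ++ (s ++ copyT)) = ((parseA_go (t ++ s)).1, (parseA_go (t ++ s)).2.1, true) := by
  rw [← List.append_assoc]; exact parseA_copy _

theorem parse_problem_name_spec : Claim_equal_parse_problem_name := by
  intro name _ hpre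
  obtain ⟨p1, p2, p3, p4, p5, p6⟩ := hpre
  simp only [PySem.Str.endswith_eq] at p1 p2 p3 p4 p5 p6
  unfold Spec_parse_problem_name parse_problem_name parse_problem_name_alt
  by_cases h1 : PySem.Chars.endswith name.toList revT = true
  · obtain ⟨t, ht⟩ := (PySem.Chars.endswith_iff _ _).mp h1
    rw [← ht] at p1 p3 p4 ⊢
    by_cases h2 : PySem.Chars.endswith t revT = true
    · obtain ⟨t2, ht2⟩ := (PySem.Chars.endswith_iff _ _).mp h2
      exfalso
      rw [← ht2] at p1
      apply absurd p1
      simp only [Bool.not_eq_false]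
      rw [PySem.Chars.endswith_iff]
      simpa [revT, copyT, List.append_assoc] using List.suffix_append t2 (revT ++ revT)
    · by_cases h3 : PySem.Chars.endswith t copyT = true
      · obtain ⟨t2, ht2⟩ := (PySem.Chars.endswith_iff _ _).mp h3
        rw [← ht2] at p3 p4 ⊢
        by_cases h4 : PySem.Chars.endswith t2 revT = true
        · obtain ⟨t3, ht3⟩ := (PySem.Chars.endswith_iff _ _).mp h4
          exfalso
          rw [← ht3] at p3
          apply absurd p3
          simp only [Bool.not_eq_false]
          rw [PySem.Chars.endswith_iff]
          simpa [revT, copyT, List.append_assoc] using List.suffix_append t3 (revT ++ copyT ++ revT)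
        · by_cases h5 : PySem.Chars.endswith t2 copyT = true
          · obtain ⟨t3, ht3⟩ := (PySem.Chars.endswith_iff _ _).mp h5
            exfalso
            rw [← ht3] at p4
            apply absurd p4
            simp only [Bool.not_eq_false]
            rw [PySem.Chars.endswith_iff]
            simpa [revT, copyT, List.append_assoc] using List.suffix_append t3 (copyT ++ copyT ++ revT)
          · -- leaf: name = t2 ++ copyT ++ revT, t2 bare
            simp only [Bool.not_eq_true] at h4 h5
            rw [List.append_assoc] at *
            have e1 : PySem.Chars.endswith (t2 ++ (copyT ++ revT))
                (['_', 'c', 'o', 'p', 'y', '_', 'r', 'e', 'v']) = true :=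
              ends_self t2 (copyT ++ revT)
            simp [tagTable, List.find?, e1, strip9cr,
              parseA_rev2, parseA_copy, parseA_base _ h4 h5]
      · -- leaf: name = t ++ revT, t bare
        simp only [Bool.not_eq_true] at h2 h3
        have e1 : PySem.Chars.endswith (t ++ revT)
            (['_', 'c', 'o', 'p', 'y', '_', 'r', 'e', 'v']) = false := by
          rw [show (['_', 'c', 'o', 'p', 'y', '_', 'r', 'e', 'v'] : List Char)
              = copyT ++ revT from rfl, ends_cancel]
          exact h3
        have e2 : PySem.Chars.endswith (t ++ revT)
            (['_', 'r', 'e', 'v', '_', 'c', 'o', 'p', 'y']) = false :=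
          ends_false_of_last _ _ 'v' 'y' (last_rev t) (by decide) (by decide)
        have e3 : PySem.Chars.endswith (t ++ revT) (['_', 'r', 'e', 'v']) = true :=
          ends_self t revT
        simp [tagTable, List.find?, e1, e2, e3, strip4, parseA_rev, parseA_base _ h2 h3]
  · by_cases h2 : PySem.Chars.endswith name.toList copyT = true
    · obtain ⟨t, ht⟩ := (PySem.Chars.endswith_iff _ _).mp h2
      rw [← ht] at p2 p5 p6 ⊢
      rw [← ht] at h1
      by_cases h3 : PySem.Chars.endswith t copyT = true
      · obtain ⟨t2, ht2⟩ := (PySem.Chars.endswith_iff _ _).mp h3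
        exfalso
        rw [← ht2] at p2
        apply absurd p2
        simp only [Bool.not_eq_false]
        rw [PySem.Chars.endswith_iff]
        simpa [revT, copyT, List.append_assoc] using List.suffix_append t2 (copyT ++ copyT)
      · by_cases h4 : PySem.Chars.endswith t revT = true
        · obtain ⟨t2, ht2⟩ := (PySem.Chars.endswith_iff _ _).mp h4
          rw [← ht2] at p5 p6 ⊢
          by_cases h5 : PySem.Chars.endswith t2 revT = true
          · obtain ⟨t3, ht3⟩ := (PySem.Chars.endswith_iff _ _).mp h5
            exfalso
            rw [← ht3] at p5
            apply absurd p5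
            simp only [Bool.not_eq_false]
            rw [PySem.Chars.endswith_iff]
            simpa [revT, copyT, List.append_assoc] using List.suffix_append t3 (revT ++ revT ++ copyT)
          · by_cases h6 : PySem.Chars.endswith t2 copyT = true
            · obtain ⟨t3, ht3⟩ := (PySem.Chars.endswith_iff _ _).mp h6
              exfalso
              rw [← ht3] at p6
              apply absurd p6
              simp only [Bool.not_eq_false]
              rw [PySem.Chars.endswith_iff]
              simpa [revT, copyT, List.append_assoc] using List.suffix_append t3 (copyT ++ revT ++ copyT)
            · -- leaf: name = t2 ++ revT ++ copyT, t2 bare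
              simp only [Bool.not_eq_true] at h5 h6
              rw [List.append_assoc] at *
              have e1 : PySem.Chars.endswith (t2 ++ (revT ++ copyT))
                  (['_', 'c', 'o', 'p', 'y', '_', 'r', 'e', 'v']) = false :=
                ends_false_of_last _ _ 'y' 'v' (last_rc t2) (by decide) (by decide)
              have e2 : PySem.Chars.endswith (t2 ++ (revT ++ copyT))
                  (['_', 'r', 'e', 'v', '_', 'c', 'o', 'p', 'y']) = true :=
                ends_self t2 (revT ++ copyT)
              simp [tagTable, List.find?, e1, e2, strip9rc,
                parseA_copy2, parseA_rev, parseA_base _ h5 h6]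
        · -- leaf: name = t ++ copyT, t bare
          simp only [Bool.not_eq_true] at h3 h4
          have e1 : PySem.Chars.endswith (t ++ copyT)
              (['_', 'c', 'o', 'p', 'y', '_', 'r', 'e', 'v']) = false :=
            ends_false_of_last _ _ 'y' 'v' (last_copy t) (by decide) (by decide)
          have e2 : PySem.Chars.endswith (t ++ copyT)
              (['_', 'r', 'e', 'v', '_', 'c', 'o', 'p', 'y']) = false := by
            rw [show (['_', 'r', 'e', 'v', '_', 'c', 'o', 'p', 'y'] : List Char)
                = revT ++ copyT from rfl, ends_cancel]
            exact h4
          have e3 : PySem.Chars.endswith (t ++ copyT) (['_', 'r', 'e', 'v']) = false :=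
            ends_false_of_last _ _ 'y' 'v' (last_copy t) (by decide) (by decide)
          have e4 : PySem.Chars.endswith (t ++ copyT) (['_', 'c', 'o', 'p', 'y']) = true :=
            ends_self t copyT
          simp [tagTable, List.find?, e1, e2, e3, e4, strip5, parseA_copy, parseA_base _ h4 h3]
    · -- leaf: bare name
      simp only [Bool.not_eq_true] at h1 h2
      have e1 : PySem.Chars.endswith name.toList
          (['_', 'c', 'o', 'p', 'y', '_', 'r', 'e', 'v']) = false := by
        rw [Bool.eq_false_iff]; intro h
        rw [show (['_', 'c', 'o', 'p', 'y', '_', 'r', 'e', 'v'] : List Char)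
            = copyT ++ revT from rfl] at h
        exact absurd (ends_of_ends_append _ _ _ h) (by simp [h1])
      have e2 : PySem.Chars.endswith name.toList
          (['_', 'r', 'e', 'v', '_', 'c', 'o', 'p', 'y']) = false := by
        rw [Bool.eq_false_iff]; intro h
        rw [show (['_', 'r', 'e', 'v', '_', 'c', 'o', 'p', 'y'] : List Char)
            = revT ++ copyT from rfl] at h
        exact absurd (ends_of_ends_append _ _ _ h) (by simp [h2])
      have e3 : PySem.Chars.endswith name.toList (['_', 'r', 'e', 'v']) = false := h1
      have e4 : PySem.Chars.endswith name.toList (['_', 'c', 'o', 'p', 'y']) = false := h2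
      simp [tagTable, List.find?, e1, e2, e3, e4, parseA_base _ h1 h2]

-- ===== VERDICT (by name: the statement is the Claim_ definition above) =====
-- (parse_problem_name_spec above proves Claim_equal_parse_problem_name)
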